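-- pv_equiv track=rewrite | github.com/brittbowers/pianissimo | model_windows.py | dict_note_index
-- ===== SOURCE A (Python) =====
-- from collections import defaultdict
--
-- def dict_note_index(time_notes):
--     dict_index = defaultdict(int)
--     dict_index['e'] = 0
--     i = 1
--     for time, notes in time_notes.items():
--         if notes not in dict_index:
--             dict_index[notes] = i
--             i += 1
--         else:
--             pass
--     return dict_index
-- ===== SOURCE B (Python) =====
-- from collections import defaultdict
--
-- def dict_note_index(time_notes):
--     notes = list(time_notes.values())
--     result = defaultdict(int)
--     result['e'] = 0
--     for i, n in enumerate(notes):
--         if n != 'e' and n not in notes[:i]: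
--             result[n] = len(set(notes[:i + 1]) - {'e'})
--     return result
-- ===== Notes on version B (the rewrite author's own statement) =====
-- stated objective: alternative
-- what changed: A maintains a running counter and a membership test against the dict being built; B has no counter at all: at each first occurrence of a non-'e' note (detected against the list prefix) it computes the index from scratch as the cardinality of the set of non-'e' values in the prefix, trading the incremental state for brute-force prefix recomputation.
import Mathlib
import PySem

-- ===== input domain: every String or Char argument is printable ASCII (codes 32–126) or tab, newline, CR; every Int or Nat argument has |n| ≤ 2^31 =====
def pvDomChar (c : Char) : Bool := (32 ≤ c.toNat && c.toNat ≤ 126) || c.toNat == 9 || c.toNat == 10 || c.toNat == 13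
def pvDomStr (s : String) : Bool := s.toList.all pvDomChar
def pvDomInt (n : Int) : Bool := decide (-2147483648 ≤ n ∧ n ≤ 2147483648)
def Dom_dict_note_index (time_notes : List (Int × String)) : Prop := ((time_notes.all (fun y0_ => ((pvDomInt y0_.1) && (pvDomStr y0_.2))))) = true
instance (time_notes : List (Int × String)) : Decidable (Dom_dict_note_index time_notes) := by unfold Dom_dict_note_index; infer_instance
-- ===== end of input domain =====

-- B replaces A's running counter by a direct rank computation: at each first occurrence of a
-- non-'e' note it stores the number of distinct non-'e' values in the prefix seen so far,
-- computed from scratch as a set cardinality (brute force over prefixes instead of a counter).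

-- ===== PORT A =====
def dict_note_index (time_notes : List (Int × String)) : List (String × Int) :=
  let r := time_notes.foldl
    (fun s p => if s.1.contains p.2 then s else (s.1.insert p.2 s.2, s.2 + 1))
    (((PySem.Dict.empty : PySem.Dict String Int).insert "e" 0), 1)
  r.1.items

-- ===== PORT B =====
def dict_note_index_alt (time_notes : List (Int × String)) : List (String × Int) :=
  let notes := time_notes.map (·.2)
  let result := (PySem.List.enumerate notes 0).foldl
    (fun d p =>
      if p.2 != "e" && !(PySem.List.slice notes none (some p.1)).contains p.2 then
        d.insert p.2 (PySem.Set.len (PySem.Set.diff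
          (PySem.Set.ofList (PySem.List.slice notes none (some (p.1 + 1))))
          (PySem.Set.ofList ["e"])))
      else d)
    ((PySem.Dict.empty : PySem.Dict String Int).insert "e" 0)
  result.items

-- ===== PRECONDITION & SPEC =====
def Spec_dict_note_index (time_notes : List (Int × String)) (out : List (String × Int)) : Prop := out = dict_note_index_alt time_notes
instance (time_notes : List (Int × String)) (out : List (String × Int)) : Decidable (Spec_dict_note_index time_notes out) := by unfold Spec_dict_note_index; infer_instance

-- ===== CLAIM (what is proved, stated in full; the proofs are below) =====
def Claim_equal_dict_note_index : Prop := ∀ (time_notes : List (Int × String)), Dom_dict_note_index time_notes → Spec_dict_note_index time_notes (dict_note_index time_notes)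

-- ===== LEMMAS AND PROOFS =====

-- ordered first-occurrence dedup of xs relative to an already-seen list
def freshDedup (seen : List String) : List String → List String
  | [] => []
  | y :: ys => if seen.contains y then freshDedup seen ys else y :: freshDedup (seen ++ [y]) ys

lemma freshDedup_congr (xs : List String) (s1 s2 : List String)
    (H : ∀ y, y ∈ s1 ↔ y ∈ s2) : freshDedup s1 xs = freshDedup s2 xs := by
  induction xs generalizing s1 s2 with
  | nil => simp [freshDedup]
  | cons y ys ih =>
    by_cases h : y ∈ s1
    · have h2 : y ∈ s2 := (H y).mp h
      simp only [freshDedup]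
      rw [if_pos (by simpa using h), if_pos (by simpa using h2)]
      exact ih s1 s2 H
    · have h2 : y ∉ s2 := fun hc => h ((H y).mpr hc)
      simp only [freshDedup]
      rw [if_neg (by simpa using h), if_neg (by simpa using h2)]
      refine congrArg (y :: ·) (ih _ _ ?_)
      intro z; simp only [List.mem_append, List.mem_singleton, H z]

lemma freshDedup_snoc (seen xs : List String) (y : String) :
    freshDedup seen (xs ++ [y])
      = freshDedup seen xs ++ (if y ∈ seen ∨ y ∈ xs then [] else [y]) := by
  induction xs generalizing seen with
  | nil =>
    by_cases h : y ∈ seen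
    · simp [freshDedup, h]
    · simp [freshDedup, h]
  | cons x xs ih =>
    by_cases h : x ∈ seen
    · rw [List.cons_append]
      simp only [freshDedup]
      rw [if_pos (by simpa using h), if_pos (by simpa using h), ih seen]
      congr 1
      by_cases hy : y = x
      · subst hy; simp [h]
      · simp [hy]
    · rw [List.cons_append]
      simp only [freshDedup]
      rw [if_neg (by simpa using h), if_neg (by simpa using h), ih (seen ++ [x])]
      simp only [List.cons_append]
      congr 2
      by_cases hy : y = x
      · subst hy; simp
      · simp [hy, List.mem_append]

lemma foldl_add_eq_freshDedup (xs : List String) (acc : PySem.Set String) :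
    xs.foldl PySem.Set.add acc = acc ++ freshDedup acc xs := by
  induction xs generalizing acc with
  | nil => simp [freshDedup]
  | cons y ys ih =>
    by_cases h : y ∈ acc
    · simp [List.foldl_cons, PySem.Set.add, h, freshDedup, ih]
    · simp [List.foldl_cons, PySem.Set.add, h, freshDedup, ih]

lemma dedup_eq_freshDedup (xs : List String) :
    PySem.List.dedup xs = freshDedup [] xs := by
  have := foldl_add_eq_freshDedup xs []
  simpa [PySem.List.dedup, PySem.Set.ofList_eq_foldl] using this

lemma filter_freshDedup (xs : List String) (s1 s2 s1' : List String)
    (H : ∀ y, y ∈ s1' ↔ (y ∈ s1 ∨ y ∈ s2)) :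
    (freshDedup s1 xs).filter (fun y => !s2.contains y) = freshDedup s1' xs := by
  induction xs generalizing s1 s1' with
  | nil => simp [freshDedup]
  | cons y ys ih =>
    by_cases h1 : y ∈ s1
    · have h1' : y ∈ s1' := (H y).mpr (Or.inl h1)
      simp only [freshDedup]
      rw [if_pos (by simpa using h1), if_pos (by simpa using h1')]
      exact ih _ _ H
    · by_cases h2 : y ∈ s2
      · have h1' : y ∈ s1' := (H y).mpr (Or.inr h2)
        simp only [freshDedup]
        rw [if_neg (by simpa using h1), if_pos (by simpa using h1')]
        rw [List.filter_cons_of_neg (by simpa using h2)]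
        refine ih (s1 ++ [y]) s1' ?_
        intro z
        rw [H z]
        constructor
        · rintro (hz | hz)
          · exact Or.inl (List.mem_append_left _ hz)
          · exact Or.inr hz
        · rintro (hz | hz)
          · rcases List.mem_append.mp hz with hz | hz
            · exact Or.inl hz
            · simp only [List.mem_singleton] at hz; subst hz; exact Or.inr h2
          · exact Or.inr hz
      · have h1' : y ∉ s1' := fun hc => by rcases (H y).mp hc with h | h <;> contradiction
        simp only [freshDedup]
        rw [if_neg (by simpa using h1), if_neg (by simpa using h1')]
        rw [List.filter_cons_of_pos (by simpa using h2)]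
        refine congrArg (y :: ·) (ih (s1 ++ [y]) (s1' ++ [y]) ?_)
        intro z
        simp only [List.mem_append, List.mem_singleton, H z]
        tauto

-- the set cardinality B computes over a prefix IS the length of freshDedup ["e"]
lemma diff_eq_freshDedup (l : List String) :
    PySem.Set.diff (PySem.Set.ofList l) (PySem.Set.ofList ["e"])
      = freshDedup ["e"] l := by
  have hof : PySem.Set.ofList l = PySem.List.dedup l := by
    simp [PySem.List.dedup_eq_ofList]
  rw [PySem.Set.diff, hof, dedup_eq_freshDedup]
  have hset : PySem.Set.ofList ["e"] = ["e"] := by decide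
  rw [hset]
  exact filter_freshDedup l [] ["e"] ["e"] (by intro y; simp)

lemma A_inv (l : List (Int × String)) (d : PySem.Dict String Int) (i : Int)
    (seen : List String) (H : ∀ y, d.contains y = true ↔ y ∈ seen) :
    (l.foldl (fun s p => if s.1.contains p.2 then s else (s.1.insert p.2 s.2, s.2 + 1)) (d, i)).1.items
      = d.items ++ (PySem.List.enumerate (freshDedup seen (l.map (·.2))) i).map (fun p => (p.2, p.1)) := by
  induction l generalizing d i seen with
  | nil => simp [freshDedup]
  | cons p rest ih =>
    rw [List.map_cons, List.foldl_cons]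
    by_cases h : d.contains p.2 = true
    · have hs : p.2 ∈ seen := (H p.2).mp h
      rw [if_pos h]
      rw [show freshDedup seen (p.2 :: rest.map (·.2)) = freshDedup seen (rest.map (·.2)) by
        simp only [freshDedup]; rw [if_pos (by simpa using hs)]]
      exact ih d i seen H
    · simp only [Bool.not_eq_true] at h
      have hs : p.2 ∉ seen := fun hc => by rw [← H p.2] at hc; rw [h] at hc; exact Bool.false_ne_true hc
      rw [if_neg (by simp [h])]
      rw [show freshDedup seen (p.2 :: rest.map (·.2)) = p.2 :: freshDedup (seen ++ [p.2]) (rest.map (·.2)) by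
        simp only [freshDedup]; rw [if_neg (by simpa using hs)]]
      have H' : ∀ y, (d.insert p.2 i).contains y = true ↔ y ∈ seen ++ [p.2] := by
        intro y
        rw [PySem.Dict.contains_insert]
        simp only [List.mem_append, List.mem_singleton, Bool.or_eq_true, beq_iff_eq, H y]
        tauto
      rw [ih (d.insert p.2 i) (i + 1) (seen ++ [p.2]) H']
      rw [PySem.Dict.items_insert_of_not_contains _ _ h]
      rw [PySem.List.enumerate_cons]
      simp

-- B's loop invariant: processing the tail 'rest' of notes = pre ++ rest, with indices starting
-- at pre.length and a dict whose keys are 'e' plus the members of pre, appends exactly the fresh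
-- notes of rest paired with their brute-force ranks.
lemma B_inv (notes : List String) (rest pre : List String) (d : PySem.Dict String Int)
    (hsplit : notes = pre ++ rest)
    (H : ∀ y, d.contains y = true ↔ (y = "e" ∨ y ∈ pre)) :
    ((PySem.List.enumerate rest (pre.length : Int)).foldl
      (fun d p =>
        if p.2 != "e" && !(PySem.List.slice notes none (some p.1)).contains p.2 then
          d.insert p.2 (PySem.Set.len (PySem.Set.diff
            (PySem.Set.ofList (PySem.List.slice notes none (some (p.1 + 1))))
            (PySem.Set.ofList ["e"])))
        else d) d).items
      = d.items ++ (PySem.List.enumerate (freshDedup ("e" :: pre) rest)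
          (((freshDedup ["e"] pre).length : Int) + 1)).map (fun p => (p.2, p.1)) := by
  induction rest generalizing pre d with
  | nil => simp [freshDedup]
  | cons n rest' ih =>
    rw [PySem.List.enumerate_cons, List.foldl_cons]
    have hslice : PySem.List.slice notes none (some ((pre.length : Nat) : Int)) = pre := by
      rw [PySem.List.slice_to_natCast, hsplit, List.take_left]
    have hslice1 : PySem.List.slice notes none (some (((pre.length : Nat) : Int) + 1)) = pre ++ [n] := by
      have : ((pre.length : Nat) : Int) + 1 = ((pre.length + 1 : Nat) : Int) := by push_cast; ring
      rw [this, PySem.List.slice_to_natCast, hsplit]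
      rw [show pre ++ n :: rest' = (pre ++ [n]) ++ rest' by simp]
      rw [show pre.length + 1 = (pre ++ [n]).length by simp]
      exact List.take_left
    by_cases hfresh : n ≠ "e" ∧ n ∉ pre
    · have hcond : (n != "e" && !(PySem.List.slice notes none (some ((pre.length : Nat) : Int))).contains n) = true := by
        rw [hslice]
        simp [hfresh.1, hfresh.2]
      rw [if_pos hcond, hslice1]
      have hval : PySem.Set.len (PySem.Set.diff (PySem.Set.ofList (pre ++ [n])) (PySem.Set.ofList ["e"]))
          = ((freshDedup ["e"] pre).length : Int) + 1 := by
        rw [PySem.Set.len, diff_eq_freshDedup, freshDedup_snoc]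
        rw [if_neg (by simp [hfresh.1, hfresh.2])]
        simp only [List.length_append, List.length_cons, List.length_nil]
        push_cast
        omega
      rw [hval]
      have hnotc : d.contains n = false := by
        cases hc : d.contains n
        · rfl
        · exfalso; rcases (H n).mp hc with h | h
          · exact hfresh.1 h
          · exact hfresh.2 h
      have H' : ∀ y, (d.insert n (((freshDedup ["e"] pre).length : Int) + 1)).contains y = true
          ↔ (y = "e" ∨ y ∈ pre ++ [n]) := by
        intro y
        rw [PySem.Dict.contains_insert]
        simp only [List.mem_append, List.mem_singleton, Bool.or_eq_true, beq_iff_eq, H y]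
        tauto
      have hstep := ih (pre ++ [n]) (d.insert n (((freshDedup ["e"] pre).length : Int) + 1))
        (by simpa using hsplit) H'
      rw [show ((pre.length : Nat) : Int) + 1 = (((pre ++ [n]).length : Nat) : Int) by simp only [List.length_append, List.length_cons, List.length_nil]; push_cast; omega] at *
      rw [hstep]
      rw [PySem.Dict.items_insert_of_not_contains _ _ hnotc]
      rw [show freshDedup ("e" :: pre) (n :: rest') = n :: freshDedup ("e" :: (pre ++ [n])) rest' by
        simp only [freshDedup]
        rw [if_neg (by simp [hfresh.1, hfresh.2])]
        congr 1]
      rw [PySem.List.enumerate_cons]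
      have hlen : ((freshDedup ["e"] (pre ++ [n])).length : Int) + 1
          = (((freshDedup ["e"] pre).length : Int) + 1) + 1 := by
        rw [freshDedup_snoc, if_neg (by simp [hfresh.1, hfresh.2])]
        simp only [List.length_append, List.length_cons, List.length_nil]
        push_cast
        omega
      rw [hlen]
      simp
    · have hseen : n = "e" ∨ n ∈ pre := by
        by_cases h1 : n = "e"
        · exact Or.inl h1
        · right
          by_contra h2
          exact hfresh ⟨h1, h2⟩
      have hcond : (n != "e" && !(PySem.List.slice notes none (some ((pre.length : Nat) : Int))).contains n) = false := by
        rw [hslice]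
        rcases hseen with h | h
        · simp [h]
        · simp [h]
      rw [if_neg (by rw [hcond]; simp)]
      have H' : ∀ y, d.contains y = true ↔ (y = "e" ∨ y ∈ pre ++ [n]) := by
        intro y
        rw [H y]
        constructor
        · rintro (h | h)
          · exact Or.inl h
          · exact Or.inr (List.mem_append_left _ h)
        · rintro (h | h)
          · exact Or.inl h
          · rcases List.mem_append.mp h with h | h
            · exact Or.inr h
            · rw [List.mem_cons] at h
              rcases h with h | h
              · subst h
                rcases hseen with hs | hs
                · exact Or.inl hs
                · exact Or.inr hs
              · simp at h
      have hstep := ih (pre ++ [n]) d (by simpa using hsplit) H'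
      rw [show ((pre.length : Nat) : Int) + 1 = (((pre ++ [n]).length : Nat) : Int) by simp only [List.length_append, List.length_cons, List.length_nil]; push_cast; omega]
      rw [hstep]
      rw [show freshDedup ("e" :: pre) (n :: rest') = freshDedup ("e" :: pre) rest' by
        simp only [freshDedup]
        rw [if_pos (by rcases hseen with h | h <;> simp [h])]]
      rw [freshDedup_congr rest' ("e" :: (pre ++ [n])) ("e" :: pre) (by
        intro y
        simp only [List.mem_cons, List.mem_append]
        constructor
        · rintro (h | h | h | h)
          · exact Or.inl h
          · exact Or.inr h
          · subst h
            rcases hseen with hs | hs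
            · exact Or.inl hs
            · exact Or.inr hs
          · cases h
        · rintro (h | h)
          · exact Or.inl h
          · exact Or.inr (Or.inl h))]
      rw [show ((freshDedup ["e"] (pre ++ [n])).length : Int)
          = ((freshDedup ["e"] pre).length : Int) by
        rw [freshDedup_snoc, if_pos (by
          rcases hseen with h | h
          · exact Or.inl (by simp [h])
          · exact Or.inr h)]
        simp]

-- ===== VERDICT (by name: the statement is the Claim_ definition above) =====
theorem dict_note_index_spec : Claim_equal_dict_note_index := by
  intro l _
  unfold Spec_dict_note_index dict_note_index dict_note_index_alt
  set d0 : PySem.Dict String Int := (PySem.Dict.empty : PySem.Dict String Int).insert "e" 0 with hd0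
  have hcont : ∀ y : String, d0.contains y = true ↔ y ∈ (["e"] : List String) := by
    intro y
    rw [hd0, PySem.Dict.contains_insert]
    simp [PySem.Dict.contains_empty]
  have hA := A_inv l d0 1 ["e"] hcont
  have hB := B_inv (l.map (·.2)) (l.map (·.2)) [] d0 (by simp) (by
    intro y
    rw [hcont y]
    simp)
  simp only [List.length_nil, Nat.cast_zero] at hB
  simp only [hA]
  rw [hB]
  norm_num [freshDedup]
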